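-- pv_equiv track=rewrite | github.com/shagunsodhani/powerlaw | powerlaw/distribution.py | frequency_distribution
-- ===== SOURCE A (Python) =====
-- def frequency_distribution(series, pdf = True, ccdf = True):
--     """
--
--     Generator to generates pdf(probability distribution function) or cdf(cummulative distribution function) or ccdf(complementary cummulative distribution function) of any series.
--
--     **Parameters**
--
--         series : list of values.
--
--         pdf : Boolean. If True, return pdf else cdf
--             Default value is True
--
--         ccdf : Boolean. This is considered only if pdf is set to False. If ccdf = True, return ccdf else cdf
--             Default value is True
--
--     **Returns**
--
--         (key, value) pairs are returned where key is one of the entries from the input series and value is the corresponding pdf for the key.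
--         The pairs are sorted by key.
--
--     """
--
--     sorted_series = sorted(series)
--     key_to_return = -1
--
--     if(pdf==True or ccdf==False):
--
--         if(pdf==True):
--             def update_value (value):
--                 return 1
--         else:
--             def update_value (value):
--                 return value+1
--
--         value_to_return = 0
--         for key in sorted_series:
--         # print key
--             if(key>key_to_return and key_to_return!=-1):
--                 yield (key_to_return, value_to_return)
--                 key_to_return = key
--                 value_to_return = update_value(value_to_return)
--             else:
--                 key_to_return = key
--                 value_to_return+=1
--         yield (key_to_return, value_to_return)
--
--     else:
--         count = len(sorted_series)
--         # print sorted_series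
--         value_to_deduct = 0
--         for key in sorted_series:
--             if(key>key_to_return and key_to_return!=-1):
--                 yield (key_to_return, count)
--                 count -=value_to_deduct
--                 key_to_return = key
--                 value_to_deduct = 1
--             else:
--                 key_to_return = key
--                 value_to_deduct+=1
--         yield (key_to_return, count)
-- ===== SOURCE B (Python) =====
-- def frequency_distribution(series, pdf=True, ccdf=True):
--     # Counter-style dict + sort of distinct keys only + running sums: O(n + u log u)
--     counts = {}
--     for x in series:
--         counts[x] = counts.get(x, 0) + 1
--     keys = sorted(counts)
--     out = []
--     if pdf:
--         for k in keys:
--             out.append((k, counts[k]))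
--     elif not ccdf:
--         acc = 0
--         for k in keys:
--             acc += counts[k]
--             out.append((k, acc))
--     else:
--         rem = len(series)
--         for k in keys:
--             out.append((k, rem))
--             rem -= counts[k]
--     return out
-- ===== Notes on version B (the rewrite author's own statement) =====
-- stated objective: faster
-- what changed: Instead of sorting the whole series and scanning it with a -1-sentinel state machine, B counts occurrences in one dict pass, sorts only the distinct keys, and emits per-key counts / running prefix or suffix sums; the -1 sentinel and empty-series quirks of A are declared as an intended difference (D_).
-- intended difference: On an empty series A yields the sentinel pair (-1, 0), and on a series containing -1 together with a larger value A's -1 sentinel merges the -1 group into the next key, dropping the (-1, value) pair; B returns the true distribution ([] on empty, one pair per distinct key), which is the intended value. — e.g. on frequency_distribution([-1, 3], true, true): A returns [(3, 2)], B returns [(-1, 1), (3, 1)]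
import Mathlib
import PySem

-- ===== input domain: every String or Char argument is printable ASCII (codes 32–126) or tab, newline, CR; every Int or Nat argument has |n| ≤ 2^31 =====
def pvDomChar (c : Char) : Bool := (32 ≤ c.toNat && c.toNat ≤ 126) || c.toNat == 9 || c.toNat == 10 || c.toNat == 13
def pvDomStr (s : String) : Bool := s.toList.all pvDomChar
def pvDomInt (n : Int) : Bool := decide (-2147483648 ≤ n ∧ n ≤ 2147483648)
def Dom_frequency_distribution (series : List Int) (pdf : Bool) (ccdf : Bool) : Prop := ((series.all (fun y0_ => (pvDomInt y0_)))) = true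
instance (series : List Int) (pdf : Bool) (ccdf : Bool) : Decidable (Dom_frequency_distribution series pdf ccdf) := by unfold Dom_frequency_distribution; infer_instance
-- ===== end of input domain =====

-- B replaces A's sort-everything-and-scan-with-a-sentinel generator by a count dict, a sort of the
-- distinct keys only, and running prefix/suffix sums; A's -1-sentinel/empty-series quirks are an
-- intended difference (D_ below).

-- ===== PORT A =====
-- the pdf/cdf generator loop of A ('update_value' is the closure chosen before the loop)
def pvFreqLoopYield (sortedSeries : List Int) (keyToReturn valueToReturn : Int)
    (updateValue : Int → Int) : List (Int × Int) :=
  match sortedSeries with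
  | [] => [(keyToReturn, valueToReturn)]
  | key :: rest =>
    if key > keyToReturn ∧ keyToReturn ≠ -1 then
      (keyToReturn, valueToReturn) :: pvFreqLoopYield rest key (updateValue valueToReturn) updateValue
    else
      pvFreqLoopYield rest key (valueToReturn + 1) updateValue

-- the ccdf generator loop of A
def pvFreqLoopCcdf (sortedSeries : List Int) (keyToReturn count valueToDeduct : Int) : List (Int × Int) :=
  match sortedSeries with
  | [] => [(keyToReturn, count)]
  | key :: rest =>
    if key > keyToReturn ∧ keyToReturn ≠ -1 then
      (keyToReturn, count) :: pvFreqLoopCcdf rest key (count - valueToDeduct) 1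
    else
      pvFreqLoopCcdf rest key count (valueToDeduct + 1)

def frequency_distribution (series : List Int) (pdf : Bool) (ccdf : Bool) : List (Int × Int) :=
  let sortedSeries := PySem.List.sorted series (fun x => x) false
  if pdf = true ∨ ccdf = false then
    let updateValue : Int → Int := if pdf = true then fun _ => 1 else fun v => v + 1
    pvFreqLoopYield sortedSeries (-1) 0 updateValue
  else
    pvFreqLoopCcdf sortedSeries (-1) (sortedSeries.length : Int) 0

-- ===== PORT B =====
def frequency_distribution_alt (series : List Int) (pdf : Bool) (ccdf : Bool) : List (Int × Int) :=
  let counts := series.foldl (fun d x => d.insert x (d.getD x 0 + 1)) PySem.Dict.empty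
  let keys := PySem.List.sorted counts.keys (fun k => k) false
  if pdf then
    keys.foldl (fun out k => out ++ [(k, counts.getD k 0)]) []
  else if !ccdf then
    (keys.foldl (fun st k => (st.1 ++ [(k, st.2 + counts.getD k 0)], st.2 + counts.getD k 0))
      (([] : List (Int × Int)), (0 : Int))).1
  else
    (keys.foldl (fun st k => (st.1 ++ [(k, st.2)], st.2 - counts.getD k 0))
      (([] : List (Int × Int)), (series.length : Int))).1

-- ===== PRECONDITION & SPEC =====
-- On an empty series A yields the sentinel pair (-1, 0), and on a series containing -1 together with
-- a larger value A's -1 sentinel merges the -1 group into the next key, dropping the (-1, value)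
-- pair; B returns the true distribution ([] on empty, one pair per distinct key), the intended value.
def D_frequency_distribution (series : List Int) (pdf : Bool) (ccdf : Bool) : Prop :=
  series = [] ∨ ((-1 : Int) ∈ series ∧ ∃ x ∈ series, (-1 : Int) < x)
instance (series : List Int) (pdf : Bool) (ccdf : Bool) : Decidable (D_frequency_distribution series pdf ccdf) := by
  unfold D_frequency_distribution; infer_instance

def Spec_frequency_distribution (series : List Int) (pdf : Bool) (ccdf : Bool) (out : List (Int × Int)) : Prop :=
  ¬ D_frequency_distribution series pdf ccdf → out = frequency_distribution_alt series pdf ccdf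
instance (series : List Int) (pdf : Bool) (ccdf : Bool) (out : List (Int × Int)) : Decidable (Spec_frequency_distribution series pdf ccdf out) := by
  unfold Spec_frequency_distribution; infer_instance

def pvDiffWitness_frequency_distribution : List Int × Bool × Bool := ([-1, 3], true, true)
def pvDiffWitnessOut_frequency_distribution : (List (Int × Int)) × (List (Int × Int)) :=
  ([(3, 2)], [(-1, 1), (3, 1)])

-- ===== CLAIM (what is proved, stated in full; the proofs are below) =====
def Claim_unchanged_frequency_distribution : Prop := ∀ (series : List Int) (pdf : Bool) (ccdf : Bool), Dom_frequency_distribution series pdf ccdf → Spec_frequency_distribution series pdf ccdf (frequency_distribution series pdf ccdf)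
def Claim_changed_frequency_distribution : Prop := Dom_frequency_distribution (pvDiffWitness_frequency_distribution.1) (pvDiffWitness_frequency_distribution.2.1) (pvDiffWitness_frequency_distribution.2.2) ∧ D_frequency_distribution (pvDiffWitness_frequency_distribution.1) (pvDiffWitness_frequency_distribution.2.1) (pvDiffWitness_frequency_distribution.2.2) ∧ frequency_distribution (pvDiffWitness_frequency_distribution.1) (pvDiffWitness_frequency_distribution.2.1) (pvDiffWitness_frequency_distribution.2.2) = pvDiffWitnessOut_frequency_distribution.1 ∧ frequency_distribution_alt (pvDiffWitness_frequency_distribution.1) (pvDiffWitness_frequency_distribution.2.1) (pvDiffWitness_frequency_distribution.2.2) = pvDiffWitnessOut_frequency_distribution.2 ∧ pvDiffWitnessOut_frequency_distribution.1 ≠ pvDiffWitnessOut_frequency_distribution.2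
def Claim_exact_frequency_distribution : Prop := ∀ (series : List Int) (pdf : Bool) (ccdf : Bool), Dom_frequency_distribution series pdf ccdf → D_frequency_distribution series pdf ccdf → frequency_distribution series pdf ccdf ≠ frequency_distribution_alt series pdf ccdf

-- ===== LEMMAS AND PROOFS =====

-- strictly-increasing list of the distinct keys of a (sorted) list
def pvSdedup : List Int → List Int
  | [] => []
  | x :: t => x :: pvSdedup (t.filter (fun y => decide (x < y)))
termination_by l => l.length
decreasing_by simpa using Nat.lt_succ_of_le ((List.length_filter_le _ _).trans (by simp))

-- reference run-length views of A's three modes, over the sorted series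
def pvPdfRuns : List Int → List (Int × Int)
  | [] => []
  | x :: t => (x, 1 + (t.count x : Int)) :: pvPdfRuns (t.filter (fun y => decide (x < y)))
termination_by l => l.length
decreasing_by simpa using Nat.lt_succ_of_le ((List.length_filter_le _ _).trans (by simp))

def pvCdfRuns : List Int → Int → List (Int × Int)
  | [], _ => []
  | x :: t, acc =>
    (x, acc + 1 + (t.count x : Int)) :: pvCdfRuns (t.filter (fun y => decide (x < y))) (acc + 1 + (t.count x : Int))
termination_by l => l.length
decreasing_by simpa using Nat.lt_succ_of_le ((List.length_filter_le _ _).trans (by simp))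

def pvCcdfRuns : List Int → Int → List (Int × Int)
  | [], _ => []
  | x :: t, rem =>
    (x, rem) :: pvCcdfRuns (t.filter (fun y => decide (x < y))) (rem - (1 + (t.count x : Int)))
termination_by l => l.length
decreasing_by simpa using Nat.lt_succ_of_le ((List.length_filter_le _ _).trans (by simp))

-- B's running-sum loops over a key list, abstracted over the per-key count f
def pvCdfList (f : Int → Int) : List Int → Int → List (Int × Int)
  | [], _ => []
  | k :: ks, acc => (k, acc + f k) :: pvCdfList f ks (acc + f k)

def pvCcdfList (f : Int → Int) : List Int → Int → List (Int × Int)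
  | [], _ => []
  | k :: ks, rem => (k, rem) :: pvCcdfList f ks (rem - f k)

theorem pvCount_filter_lt (l : List Int) (x k : Int) (h : x < k) :
    (l.filter (fun y => decide (x < y))).count k = l.count k :=
  List.count_filter (by simpa using h)

-- induction along the run structure (the recursion pattern of pvSdedup and friends)
theorem pvRunInd (P : List Int → Prop) (h0 : P [])
    (h1 : ∀ x t, P (t.filter (fun y => decide (x < y))) → P (x :: t)) : ∀ l, P l := by
  have key : ∀ n (l : List Int), l.length ≤ n → P l := by
    intro n
    induction n with
    | zero =>
      intro l hl
      rw [List.length_eq_zero_iff.mp (Nat.le_zero.mp hl)]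
      exact h0
    | succ n ih =>
      intro l hl
      cases l with
      | nil => exact h0
      | cons x t =>
        exact h1 x t (ih _ ((List.length_filter_le _ _).trans (by simpa using hl)))
  exact fun l => key l.length l le_rfl

theorem pvSdedup_subset : ∀ (l : List Int), ∀ y ∈ pvSdedup l, y ∈ l := by
  intro l
  induction l using pvRunInd with
  | h0 => simp [pvSdedup]
  | h1 x t ih =>
    intro y hy
    rw [pvSdedup] at hy
    rcases List.mem_cons.mp hy with rfl | hy
    · exact List.mem_cons_self
    · exact List.mem_cons_of_mem _ (List.mem_of_mem_filter (ih y hy))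

theorem pvSdedup_mem : ∀ (l : List Int), l.Pairwise (· ≤ ·) → ∀ y ∈ l, y ∈ pvSdedup l := by
  intro l
  induction l using pvRunInd with
  | h0 => simp
  | h1 x t ih =>
    intro hp y hy
    rw [pvSdedup]
    rcases List.mem_cons.mp hy with rfl | hy
    · exact List.mem_cons_self
    · rcases List.pairwise_cons.mp hp with ⟨hx, ht⟩
      by_cases hlt : x < y
      · exact List.mem_cons_of_mem _
          (ih (ht.filter _) y (List.mem_filter.mpr ⟨hy, by simpa using hlt⟩))
      · have : y = x := le_antisymm (not_lt.mp hlt) (hx y hy)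
        simp [this]

theorem pvSdedup_pairwise : ∀ (l : List Int), l.Pairwise (· ≤ ·) → (pvSdedup l).Pairwise (· < ·) := by
  intro l
  induction l using pvRunInd with
  | h0 => simp [pvSdedup]
  | h1 x t ih =>
    intro hp
    rcases List.pairwise_cons.mp hp with ⟨_, ht⟩
    rw [pvSdedup]
    refine List.pairwise_cons.mpr ⟨?_, ih (ht.filter _)⟩
    intro y hy
    have := pvSdedup_subset _ y hy
    simpa using (List.mem_filter.mp this).2

theorem pvPdfRuns_eq : ∀ (l : List Int), l.Pairwise (· ≤ ·) →
    pvPdfRuns l = (pvSdedup l).map (fun k => (k, (l.count k : Int))) := by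
  intro l
  induction l using pvRunInd with
  | h0 => simp [pvPdfRuns, pvSdedup]
  | h1 x t ih =>
    intro hp
    rcases List.pairwise_cons.mp hp with ⟨_, ht⟩
    rw [pvPdfRuns, pvSdedup, List.map_cons]
    refine congrArg₂ _ ?_ ?_
    · simp [List.count_cons_self]; ring
    · rw [ih (ht.filter _)]
      refine List.map_congr_left ?_
      intro k hk
      have hkt := List.mem_filter.mp (pvSdedup_subset _ k hk)
      have hxk : x < k := by simpa using hkt.2
      have h1 : ((x :: t).count k) = t.count k := by
        rw [List.count_cons]
        simp
        omega
      rw [pvCount_filter_lt t x k hxk, h1]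

theorem pvCdfList_congr (f g : Int → Int) : ∀ (ks : List Int), (∀ k ∈ ks, f k = g k) →
    ∀ acc, pvCdfList f ks acc = pvCdfList g ks acc := by
  intro ks
  induction ks with
  | nil => intro _ _; rfl
  | cons k ks ih =>
    intro h acc
    have hk := h k List.mem_cons_self
    rw [pvCdfList, pvCdfList, hk, ih (fun j hj => h j (List.mem_cons_of_mem _ hj))]

theorem pvCcdfList_congr (f g : Int → Int) : ∀ (ks : List Int), (∀ k ∈ ks, f k = g k) →
    ∀ rem, pvCcdfList f ks rem = pvCcdfList g ks rem := by
  intro ks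
  induction ks with
  | nil => intro _ _; rfl
  | cons k ks ih =>
    intro h rem
    have hk := h k List.mem_cons_self
    rw [pvCcdfList, pvCcdfList, hk, ih (fun j hj => h j (List.mem_cons_of_mem _ hj))]

theorem pvCdfList_eq : ∀ (l : List Int), l.Pairwise (· ≤ ·) →
    ∀ acc, pvCdfList (fun k => (l.count k : Int)) (pvSdedup l) acc = pvCdfRuns l acc := by
  intro l
  induction l using pvRunInd with
  | h0 => intro _ acc; simp [pvCdfList, pvCdfRuns, pvSdedup]
  | h1 x t ih =>
    intro hp acc
    rcases List.pairwise_cons.mp hp with ⟨_, ht⟩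
    rw [pvSdedup, pvCdfList, pvCdfRuns]
    have hcnt : ((x :: t).count x : Int) = 1 + (t.count x : Int) := by
      simp [List.count_cons_self]; ring
    have hcong : ∀ k ∈ pvSdedup (t.filter (fun y => decide (x < y))),
        ((x :: t).count k : Int) = ((t.filter (fun y => decide (x < y))).count k : Int) := by
      intro k hk
      have hkt := List.mem_filter.mp (pvSdedup_subset _ k hk)
      have hxk : x < k := by simpa using hkt.2
      have h1 : ((x :: t).count k) = t.count k := by
        rw [List.count_cons]; simp; omega
      rw [pvCount_filter_lt t x k hxk, h1]
    refine congrArg₂ _ ?_ ?_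
    · rw [hcnt]; ring_nf
    · rw [pvCdfList_congr _ _ _ hcong,
        ih (ht.filter _) (acc + ((x :: t).count x : Int)), hcnt]
      ring_nf

theorem pvCcdfList_eq : ∀ (l : List Int), l.Pairwise (· ≤ ·) →
    ∀ rem, pvCcdfList (fun k => (l.count k : Int)) (pvSdedup l) rem = pvCcdfRuns l rem := by
  intro l
  induction l using pvRunInd with
  | h0 => intro _ rem; simp [pvCcdfList, pvCcdfRuns, pvSdedup]
  | h1 x t ih =>
    intro hp rem
    rcases List.pairwise_cons.mp hp with ⟨_, ht⟩
    rw [pvSdedup, pvCcdfList, pvCcdfRuns]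
    have hcnt : ((x :: t).count x : Int) = 1 + (t.count x : Int) := by
      simp [List.count_cons_self]; ring
    have hcong : ∀ k ∈ pvSdedup (t.filter (fun y => decide (x < y))),
        ((x :: t).count k : Int) = ((t.filter (fun y => decide (x < y))).count k : Int) := by
      intro k hk
      have hkt := List.mem_filter.mp (pvSdedup_subset _ k hk)
      have hxk : x < k := by simpa using hkt.2
      have h1 : ((x :: t).count k) = t.count k := by
        rw [List.count_cons]; simp; omega
      rw [pvCount_filter_lt t x k hxk, h1]
    refine congrArg₂ _ rfl ?_
    rw [pvCcdfList_congr _ _ _ hcong, ih (ht.filter _) (rem - ((x :: t).count x : Int)), hcnt]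

-- A's pdf/cdf loop, after the first (always silent) iteration, over a sorted tail
theorem pvYieldPdf_eq : ∀ (t : List Int) (k v : Int), t.Pairwise (· ≤ ·) → (∀ y ∈ t, k ≤ y) →
    ((-1 : Int) ∈ k :: t → ∀ y ∈ k :: t, y ≤ -1) →
    pvFreqLoopYield t k v (fun _ => 1) =
      (k, v + (t.count k : Int)) :: pvPdfRuns (t.filter (fun y => decide (k < y))) := by
  intro t
  induction t with
  | nil => intro k v _ _ _; simp [pvFreqLoopYield, pvPdfRuns]
  | cons x rest ih =>
    intro k v hp hlow hJ
    rcases List.pairwise_cons.mp hp with ⟨hx, hrest⟩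
    by_cases hkx : k < x
    · have hk : k ≠ -1 := by
        intro h
        have := hJ (by simp [h]) x (by simp)
        omega
      rw [pvFreqLoopYield, if_pos ⟨hkx, hk⟩]
      have hJ' : (-1 : Int) ∈ x :: rest → ∀ y ∈ x :: rest, y ≤ -1 := by
        intro hm y hy
        exact hJ (List.mem_cons_of_mem _ hm) y (List.mem_cons_of_mem _ hy)
      rw [ih x 1 hrest hx hJ']
      have hc0 : ((x :: rest).count k) = 0 := by
        refine List.count_eq_zero.mpr ?_
        intro hkm
        rcases List.mem_cons.mp hkm with rfl | hkm
        · omega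
        · have := hx k hkm; omega
      have hfs : (x :: rest).filter (fun y => decide (k < y)) = x :: rest := by
        refine List.filter_eq_self.mpr ?_
        intro y hy
        rcases List.mem_cons.mp hy with rfl | hy
        · simpa using hkx
        · have := hx y hy; simp; omega
      rw [hfs, pvPdfRuns, hc0]
      simp
    · have hxk : x = k := le_antisymm (not_lt.mp hkx) (hlow x (by simp))
      rw [pvFreqLoopYield, if_neg (by intro h; exact hkx h.1)]
      have hJ' : (-1 : Int) ∈ x :: rest → ∀ y ∈ x :: rest, y ≤ -1 := fun hm y hy =>
        hJ (List.mem_cons_of_mem _ hm) y (List.mem_cons_of_mem _ hy)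
      subst hxk
      rw [ih x (v + 1) hrest hx hJ']
      have hfs : (x :: rest).filter (fun y => decide (x < y)) =
          rest.filter (fun y => decide (x < y)) := by
        rw [List.filter_cons]; simp
      rw [hfs]
      refine congrArg₂ _ ?_ rfl
      rw [List.count_cons_self]
      push_cast; ring_nf

theorem pvYieldCdf_eq : ∀ (t : List Int) (k v : Int), t.Pairwise (· ≤ ·) → (∀ y ∈ t, k ≤ y) →
    ((-1 : Int) ∈ k :: t → ∀ y ∈ k :: t, y ≤ -1) →
    pvFreqLoopYield t k v (fun w => w + 1) =
      (k, v + (t.count k : Int)) ::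
        pvCdfRuns (t.filter (fun y => decide (k < y))) (v + (t.count k : Int)) := by
  intro t
  induction t with
  | nil => intro k v _ _ _; simp [pvFreqLoopYield, pvCdfRuns]
  | cons x rest ih =>
    intro k v hp hlow hJ
    rcases List.pairwise_cons.mp hp with ⟨hx, hrest⟩
    by_cases hkx : k < x
    · have hk : k ≠ -1 := by
        intro h
        have := hJ (by simp [h]) x (by simp)
        omega
      rw [pvFreqLoopYield, if_pos ⟨hkx, hk⟩]
      have hJ' : (-1 : Int) ∈ x :: rest → ∀ y ∈ x :: rest, y ≤ -1 := by
        intro hm y hy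
        exact hJ (List.mem_cons_of_mem _ hm) y (List.mem_cons_of_mem _ hy)
      rw [ih x (v + 1) hrest hx hJ']
      have hc0 : ((x :: rest).count k) = 0 := by
        refine List.count_eq_zero.mpr ?_
        intro hkm
        rcases List.mem_cons.mp hkm with rfl | hkm
        · omega
        · have := hx k hkm; omega
      have hfs : (x :: rest).filter (fun y => decide (k < y)) = x :: rest := by
        refine List.filter_eq_self.mpr ?_
        intro y hy
        rcases List.mem_cons.mp hy with rfl | hy
        · simpa using hkx
        · have := hx y hy; simp; omega
      rw [hfs, pvCdfRuns, hc0]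
      simp
    · have hxk : x = k := le_antisymm (not_lt.mp hkx) (hlow x (by simp))
      rw [pvFreqLoopYield, if_neg (by intro h; exact hkx h.1)]
      have hJ' : (-1 : Int) ∈ x :: rest → ∀ y ∈ x :: rest, y ≤ -1 := fun hm y hy =>
        hJ (List.mem_cons_of_mem _ hm) y (List.mem_cons_of_mem _ hy)
      subst hxk
      rw [ih x (v + 1) hrest hx hJ']
      have hfs : (x :: rest).filter (fun y => decide (x < y)) =
          rest.filter (fun y => decide (x < y)) := by
        rw [List.filter_cons]; simp
      have hcnt : ((x :: rest).count x : Int) = 1 + (rest.count x : Int) := by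
        simp [List.count_cons_self]; ring
      rw [hfs, hcnt]
      refine congrArg₂ _ (by refine congrArg₂ _ rfl ?_; ring_nf) (by refine congrArg₂ _ rfl ?_; ring_nf)

theorem pvCcdfLoop_eq : ∀ (t : List Int) (k cnt ded : Int), t.Pairwise (· ≤ ·) → (∀ y ∈ t, k ≤ y) →
    ((-1 : Int) ∈ k :: t → ∀ y ∈ k :: t, y ≤ -1) →
    pvFreqLoopCcdf t k cnt ded =
      (k, cnt) :: pvCcdfRuns (t.filter (fun y => decide (k < y))) (cnt - (ded + (t.count k : Int))) := by
  intro t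
  induction t with
  | nil => intro k cnt ded _ _ _; simp [pvFreqLoopCcdf, pvCcdfRuns]
  | cons x rest ih =>
    intro k cnt ded hp hlow hJ
    rcases List.pairwise_cons.mp hp with ⟨hx, hrest⟩
    by_cases hkx : k < x
    · have hk : k ≠ -1 := by
        intro h
        have := hJ (by simp [h]) x (by simp)
        omega
      rw [pvFreqLoopCcdf, if_pos ⟨hkx, hk⟩]
      have hJ' : (-1 : Int) ∈ x :: rest → ∀ y ∈ x :: rest, y ≤ -1 := by
        intro hm y hy
        exact hJ (List.mem_cons_of_mem _ hm) y (List.mem_cons_of_mem _ hy)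
      rw [ih x (cnt - ded) 1 hrest hx hJ']
      have hc0 : ((x :: rest).count k) = 0 := by
        refine List.count_eq_zero.mpr ?_
        intro hkm
        rcases List.mem_cons.mp hkm with rfl | hkm
        · omega
        · have := hx k hkm; omega
      have hfs : (x :: rest).filter (fun y => decide (k < y)) = x :: rest := by
        refine List.filter_eq_self.mpr ?_
        intro y hy
        rcases List.mem_cons.mp hy with rfl | hy
        · simpa using hkx
        · have := hx y hy; simp; omega
      rw [hfs, pvCcdfRuns, hc0]
      simp
    · have hxk : x = k := le_antisymm (not_lt.mp hkx) (hlow x (by simp))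
      rw [pvFreqLoopCcdf, if_neg (by intro h; exact hkx h.1)]
      have hJ' : (-1 : Int) ∈ x :: rest → ∀ y ∈ x :: rest, y ≤ -1 := fun hm y hy =>
        hJ (List.mem_cons_of_mem _ hm) y (List.mem_cons_of_mem _ hy)
      subst hxk
      rw [ih x cnt (ded + 1) hrest hx hJ']
      have hfs : (x :: rest).filter (fun y => decide (x < y)) =
          rest.filter (fun y => decide (x < y)) := by
        rw [List.filter_cons]; simp
      have hcnt : ((x :: rest).count x : Int) = 1 + (rest.count x : Int) := by
        simp [List.count_cons_self]; ring
      rw [hfs, hcnt]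
      refine congrArg₂ _ rfl (by refine congrArg₂ _ rfl ?_; ring_nf)

-- B's three foldl loops, unrolled
theorem pvFoldCdf (f : Int → Int) : ∀ (ks : List Int) (out : List (Int × Int)) (acc : Int),
    (ks.foldl (fun st k => (st.1 ++ [(k, st.2 + f k)], st.2 + f k)) (out, acc)).1 =
      out ++ pvCdfList f ks acc := by
  intro ks
  induction ks with
  | nil => intro out acc; simp [pvCdfList]
  | cons k ks ih =>
    intro out acc
    rw [List.foldl_cons, pvCdfList, ih]
    simp

theorem pvFoldCcdf (f : Int → Int) : ∀ (ks : List Int) (out : List (Int × Int)) (rem : Int),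
    (ks.foldl (fun st k => (st.1 ++ [(k, st.2)], st.2 - f k)) (out, rem)).1 =
      out ++ pvCcdfList f ks rem := by
  intro ks
  induction ks with
  | nil => intro out rem; simp [pvCcdfList]
  | cons k ks ih =>
    intro out rem
    rw [List.foldl_cons, pvCcdfList, ih]
    simp

-- B reduced: its key list is pvSdedup of the sorted series, its counts are counts in it
theorem pvAltKeys (series : List Int) :
    PySem.List.sorted (PySem.Dict.counter series).keys (fun k => k) false =
      pvSdedup (PySem.List.sorted series (fun x => x) false) := by
  have hperm : (PySem.List.sorted series (fun x => x) false).Perm series :=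
    PySem.List.sorted_perm _ _ _
  have hpair : (PySem.List.sorted series (fun x => x) false).Pairwise (· ≤ ·) := by
    simpa using PySem.List.sorted_pairwise series (fun x => x)
  rw [PySem.Dict.keys_counter]
  refine PySem.List.sorted_eq_of_perm_of_pairwise_lt _ _ _ ?_ ?_
  · refine (List.perm_ext_iff_of_nodup ((pvSdedup_pairwise _ hpair).nodup) (PySem.Set.nodup_ofList _)).mpr ?_
    intro a
    rw [PySem.Set.mem_ofList]
    constructor
    · intro h
      exact hperm.mem_iff.mp (pvSdedup_subset _ a h)
    · intro h
      exact pvSdedup_mem _ hpair a (hperm.mem_iff.mpr h)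
  · simpa using pvSdedup_pairwise _ hpair

-- keys never equal to -1 in A's output (used for tightness)
theorem pvYield_ne : ∀ (t : List Int) (k v : Int) (upd : Int → Int), t.Pairwise (· ≤ ·) →
    (∀ y ∈ t, k ≤ y) → ((-1 : Int) < k ∨ ∃ y ∈ t, (-1 : Int) < y) →
    ∀ p ∈ pvFreqLoopYield t k v upd, p.1 ≠ -1 := by
  intro t
  induction t with
  | nil =>
    intro k v upd _ _ hinv p hp
    rcases hinv with h | ⟨y, hy, _⟩
    · simp only [pvFreqLoopYield, List.mem_singleton] at hp
      subst hp; simp; omega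
    · exact absurd hy (List.not_mem_nil)
  | cons x rest ih =>
    intro k v upd hp hlow hinv p hpm
    rcases List.pairwise_cons.mp hp with ⟨hx, hrest⟩
    have hinv' : (-1 : Int) < x ∨ ∃ y ∈ rest, (-1 : Int) < y := by
      rcases hinv with h | ⟨y, hy, hygt⟩
      · left; exact lt_of_lt_of_le h (hlow x (by simp))
      · rcases List.mem_cons.mp hy with rfl | hy
        · left; exact hygt
        · right; exact ⟨y, hy, hygt⟩
    rw [pvFreqLoopYield] at hpm
    split at hpm
    · rename_i hcond
      rcases List.mem_cons.mp hpm with rfl | hpm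
      · exact hcond.2
      · exact ih x (upd v) upd hrest hx hinv' p hpm
    · exact ih x (v + 1) upd hrest hx hinv' p hpm

theorem pvCcdf_ne : ∀ (t : List Int) (k cnt ded : Int), t.Pairwise (· ≤ ·) →
    (∀ y ∈ t, k ≤ y) → ((-1 : Int) < k ∨ ∃ y ∈ t, (-1 : Int) < y) →
    ∀ p ∈ pvFreqLoopCcdf t k cnt ded, p.1 ≠ -1 := by
  intro t
  induction t with
  | nil =>
    intro k cnt ded _ _ hinv p hp
    rcases hinv with h | ⟨y, hy, _⟩
    · simp only [pvFreqLoopCcdf, List.mem_singleton] at hp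
      subst hp; simp; omega
    · exact absurd hy (List.not_mem_nil)
  | cons x rest ih =>
    intro k cnt ded hp hlow hinv p hpm
    rcases List.pairwise_cons.mp hp with ⟨hx, hrest⟩
    have hinv' : (-1 : Int) < x ∨ ∃ y ∈ rest, (-1 : Int) < y := by
      rcases hinv with h | ⟨y, hy, hygt⟩
      · left; exact lt_of_lt_of_le h (hlow x (by simp))
      · rcases List.mem_cons.mp hy with rfl | hy
        · left; exact hygt
        · right; exact ⟨y, hy, hygt⟩
    rw [pvFreqLoopCcdf] at hpm
    split at hpm
    · rename_i hcond
      rcases List.mem_cons.mp hpm with rfl | hpm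
      · exact hcond.2
      · exact ih x (cnt - ded) 1 hrest hx hinv' p hpm
    · exact ih x cnt (ded + 1) hrest hx hinv' p hpm

theorem pvCdfList_fst (f : Int → Int) : ∀ (ks : List Int) (acc : Int),
    (pvCdfList f ks acc).map Prod.fst = ks := by
  intro ks
  induction ks with
  | nil => intro acc; rfl
  | cons k ks ih => intro acc; rw [pvCdfList, List.map_cons, ih]

theorem pvCcdfList_fst (f : Int → Int) : ∀ (ks : List Int) (rem : Int),
    (pvCcdfList f ks rem).map Prod.fst = ks := by
  intro ks
  induction ks with
  | nil => intro rem; rfl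
  | cons k ks ih => intro rem; rw [pvCcdfList, List.map_cons, ih]


theorem pvCdfList_mem_key (f : Int → Int) (ks : List Int) (acc k : Int) (h : k ∈ ks) :
    ∃ p ∈ pvCdfList f ks acc, p.1 = k := by
  rw [← pvCdfList_fst f ks acc] at h
  exact List.mem_map.mp h

theorem pvCcdfList_mem_key (f : Int → Int) (ks : List Int) (rem k : Int) (h : k ∈ ks) :
    ∃ p ∈ pvCcdfList f ks rem, p.1 = k := by
  rw [← pvCcdfList_fst f ks rem] at h
  exact List.mem_map.mp h

-- ===== VERDICT (by name: the statement is the Claim_ definition above) =====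
theorem frequency_distribution_spec : Claim_unchanged_frequency_distribution := by
  unfold Claim_unchanged_frequency_distribution
  intro series pdf ccdf _
  unfold Spec_frequency_distribution
  intro hD
  unfold D_frequency_distribution at hD
  push Not at hD
  obtain ⟨hne, hsent⟩ := hD
  have hperm : (PySem.List.sorted series (fun x => x) false).Perm series :=
    PySem.List.sorted_perm _ _ _
  have hpair : (PySem.List.sorted series (fun x => x) false).Pairwise (· ≤ ·) := by
    simpa using PySem.List.sorted_pairwise series (fun x => x)
  cases hs : PySem.List.sorted series (fun x => x) false with
  | nil =>
    rw [hs] at hperm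
    exact absurd hperm.symm.eq_nil hne
  | cons x t =>
    rw [hs] at hperm hpair
    rcases List.pairwise_cons.mp hpair with ⟨hlow, hpt⟩
    have hJ : (-1 : Int) ∈ x :: t → ∀ y ∈ x :: t, y ≤ -1 := by
      intro hm y hy
      exact hsent (hperm.mem_iff.mp hm) y (hperm.mem_iff.mp hy)
    have hkeys : PySem.List.sorted
        (series.foldl (fun d x => d.insert x (d.getD x 0 + 1)) (PySem.Dict.empty : PySem.Dict Int Int)).keys
        (fun k => k) false = pvSdedup (x :: t) := by
      rw [PySem.Dict.foldl_insert_getD_add_one_eq_counter, pvAltKeys, hs]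
    have hgetD : ∀ k : Int,
        (series.foldl (fun d x => d.insert x (d.getD x 0 + 1)) (PySem.Dict.empty : PySem.Dict Int Int)).getD k 0
          = ((x :: t).count k : Int) := by
      intro k
      rw [PySem.Dict.foldl_insert_getD_add_one_eq_counter, PySem.Dict.getD_counter]
      exact_mod_cast (hperm.count_eq k).symm
    cases pdf with
    | true =>
      have hAdef : frequency_distribution series true ccdf =
          pvFreqLoopYield (PySem.List.sorted series (fun x => x) false) (-1) 0 (fun _ => 1) := rfl
      have hBdef : frequency_distribution_alt series true ccdf =
          (PySem.List.sorted
              (series.foldl (fun d x => d.insert x (d.getD x 0 + 1)) (PySem.Dict.empty : PySem.Dict Int Int)).keys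
              (fun k => k) false).foldl
            (fun out k => out ++
              [(k, (series.foldl (fun d x => d.insert x (d.getD x 0 + 1)) (PySem.Dict.empty : PySem.Dict Int Int)).getD k 0)])
            [] := rfl
      have hmap : (pvSdedup (x :: t)).map
            (fun k => (k, (series.foldl (fun d x => d.insert x (d.getD x 0 + 1)) (PySem.Dict.empty : PySem.Dict Int Int)).getD k 0))
          = (pvSdedup (x :: t)).map (fun k => (k, ((x :: t).count k : Int))) :=
        List.map_congr_left (fun k _ => by rw [hgetD k])
      rw [hAdef, hBdef, hkeys, PySem.List.foldl_append_singleton_eq_map, List.nil_append, hmap,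
        ← pvPdfRuns_eq _ hpair, hs, pvFreqLoopYield, if_neg (by simp),
        pvYieldPdf_eq t x (0 + 1) hpt hlow hJ, pvPdfRuns]
      norm_num
    | false =>
      cases ccdf with
      | false =>
        have hAdef : frequency_distribution series false false =
            pvFreqLoopYield (PySem.List.sorted series (fun x => x) false) (-1) 0 (fun v => v + 1) := rfl
        have hBdef : frequency_distribution_alt series false false =
            ((PySem.List.sorted
                (series.foldl (fun d x => d.insert x (d.getD x 0 + 1)) (PySem.Dict.empty : PySem.Dict Int Int)).keys
                (fun k => k) false).foldl
              (fun st k => (st.1 ++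
                  [(k, st.2 + (series.foldl (fun d x => d.insert x (d.getD x 0 + 1)) (PySem.Dict.empty : PySem.Dict Int Int)).getD k 0)],
                st.2 + (series.foldl (fun d x => d.insert x (d.getD x 0 + 1)) (PySem.Dict.empty : PySem.Dict Int Int)).getD k 0))
              (([] : List (Int × Int)), (0 : Int))).1 := rfl
        rw [hAdef, hBdef, hkeys, pvFoldCdf, List.nil_append,
          pvCdfList_congr _ (fun k => ((x :: t).count k : Int)) _ (fun k _ => hgetD k),
          pvCdfList_eq _ hpair 0, hs, pvFreqLoopYield, if_neg (by simp),
          pvYieldCdf_eq t x (0 + 1) hpt hlow hJ, pvCdfRuns]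
      | true =>
        have hAdef : frequency_distribution series false true =
            pvFreqLoopCcdf (PySem.List.sorted series (fun x => x) false) (-1)
              ((PySem.List.sorted series (fun x => x) false).length : Int) 0 := rfl
        have hBdef : frequency_distribution_alt series false true =
            ((PySem.List.sorted
                (series.foldl (fun d x => d.insert x (d.getD x 0 + 1)) (PySem.Dict.empty : PySem.Dict Int Int)).keys
                (fun k => k) false).foldl
              (fun st k => (st.1 ++ [(k, st.2)],
                st.2 - (series.foldl (fun d x => d.insert x (d.getD x 0 + 1)) (PySem.Dict.empty : PySem.Dict Int Int)).getD k 0))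
              (([] : List (Int × Int)), (series.length : Int))).1 := rfl
        have hlen : (series.length : Int) = ((x :: t).length : Int) := by
          exact_mod_cast hperm.length_eq.symm
        rw [hAdef, hBdef, hkeys, pvFoldCcdf, List.nil_append,
          pvCcdfList_congr _ (fun k => ((x :: t).count k : Int)) _ (fun k _ => hgetD k),
          pvCcdfList_eq _ hpair, hlen, hs, pvFreqLoopCcdf, if_neg (by simp),
          pvCcdfLoop_eq t x ((x :: t).length : Int) (0 + 1) hpt hlow hJ, pvCcdfRuns]
        norm_num
theorem frequency_distribution_changed : Claim_changed_frequency_distribution := by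
  unfold Claim_changed_frequency_distribution; decide
theorem frequency_distribution_tight : Claim_exact_frequency_distribution := by
  unfold Claim_exact_frequency_distribution
  intro series pdf ccdf _ hD hEq
  unfold D_frequency_distribution at hD
  rcases hD with rfl | ⟨hm1, w, hw, hwgt⟩
  · revert hEq
    cases pdf <;> cases ccdf <;> decide
  · have hperm : (PySem.List.sorted series (fun x => x) false).Perm series :=
      PySem.List.sorted_perm _ _ _
    have hpair : (PySem.List.sorted series (fun x => x) false).Pairwise (· ≤ ·) := by
      simpa using PySem.List.sorted_pairwise series (fun x => x)
    cases hs : PySem.List.sorted series (fun x => x) false with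
    | nil =>
      rw [hs] at hperm
      rw [hperm.symm.eq_nil] at hw
      exact absurd hw List.not_mem_nil
    | cons x t =>
      rw [hs] at hperm hpair
      rcases List.pairwise_cons.mp hpair with ⟨hlow, hpt⟩
      have hinv : (-1 : Int) < x ∨ ∃ y ∈ t, (-1 : Int) < y := by
        rcases List.mem_cons.mp (hperm.mem_iff.mpr hw) with rfl | hwt
        · left; exact hwgt
        · right; exact ⟨w, hwt, hwgt⟩
      have hkeys : PySem.List.sorted
          (series.foldl (fun d x => d.insert x (d.getD x 0 + 1)) (PySem.Dict.empty : PySem.Dict Int Int)).keys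
          (fun k => k) false = pvSdedup (x :: t) := by
        rw [PySem.Dict.foldl_insert_getD_add_one_eq_counter, pvAltKeys, hs]
      have hm1k : (-1 : Int) ∈ pvSdedup (x :: t) :=
        pvSdedup_mem _ hpair _ (hperm.mem_iff.mpr hm1)
      have hAne : ∀ p ∈ frequency_distribution series pdf ccdf, p.1 ≠ -1 := by
        cases pdf with
        | true =>
          intro p hp
          have hAdef : frequency_distribution series true ccdf =
              pvFreqLoopYield (PySem.List.sorted series (fun x => x) false) (-1) 0 (fun _ => 1) := rfl
          rw [hAdef, hs, pvFreqLoopYield, if_neg (by simp)] at hp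
          exact pvYield_ne t x (0 + 1) _ hpt hlow hinv p hp
        | false =>
          cases ccdf with
          | false =>
            intro p hp
            have hAdef : frequency_distribution series false false =
                pvFreqLoopYield (PySem.List.sorted series (fun x => x) false) (-1) 0 (fun v => v + 1) := rfl
            rw [hAdef, hs, pvFreqLoopYield, if_neg (by simp)] at hp
            exact pvYield_ne t x (0 + 1) _ hpt hlow hinv p hp
          | true =>
            intro p hp
            have hAdef : frequency_distribution series false true =
                pvFreqLoopCcdf (PySem.List.sorted series (fun x => x) false) (-1)
                  ((PySem.List.sorted series (fun x => x) false).length : Int) 0 := rfl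
            rw [hAdef, hs, pvFreqLoopCcdf, if_neg (by simp)] at hp
            exact pvCcdf_ne t x _ _ hpt hlow hinv p hp
      have hBm : ∃ p ∈ frequency_distribution_alt series pdf ccdf, p.1 = -1 := by
        cases pdf with
        | true =>
          have hBdef : frequency_distribution_alt series true ccdf =
              (PySem.List.sorted
                  (series.foldl (fun d x => d.insert x (d.getD x 0 + 1)) (PySem.Dict.empty : PySem.Dict Int Int)).keys
                  (fun k => k) false).foldl
                (fun out k => out ++
                  [(k, (series.foldl (fun d x => d.insert x (d.getD x 0 + 1)) (PySem.Dict.empty : PySem.Dict Int Int)).getD k 0)])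
                [] := rfl
          rw [hBdef, hkeys, PySem.List.foldl_append_singleton_eq_map, List.nil_append]
          exact ⟨_, List.mem_map_of_mem hm1k, rfl⟩
        | false =>
          cases ccdf with
          | false =>
            have hBdef : frequency_distribution_alt series false false =
                ((PySem.List.sorted
                    (series.foldl (fun d x => d.insert x (d.getD x 0 + 1)) (PySem.Dict.empty : PySem.Dict Int Int)).keys
                    (fun k => k) false).foldl
                  (fun st k => (st.1 ++
                      [(k, st.2 + (series.foldl (fun d x => d.insert x (d.getD x 0 + 1)) (PySem.Dict.empty : PySem.Dict Int Int)).getD k 0)],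
                    st.2 + (series.foldl (fun d x => d.insert x (d.getD x 0 + 1)) (PySem.Dict.empty : PySem.Dict Int Int)).getD k 0))
                  (([] : List (Int × Int)), (0 : Int))).1 := rfl
            rw [hBdef, hkeys, pvFoldCdf, List.nil_append]
            exact pvCdfList_mem_key _ _ _ _ hm1k
          | true =>
            have hBdef : frequency_distribution_alt series false true =
                ((PySem.List.sorted
                    (series.foldl (fun d x => d.insert x (d.getD x 0 + 1)) (PySem.Dict.empty : PySem.Dict Int Int)).keys
                    (fun k => k) false).foldl
                  (fun st k => (st.1 ++ [(k, st.2)],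
                    st.2 - (series.foldl (fun d x => d.insert x (d.getD x 0 + 1)) (PySem.Dict.empty : PySem.Dict Int Int)).getD k 0))
                  (([] : List (Int × Int)), (series.length : Int))).1 := rfl
            rw [hBdef, hkeys, pvFoldCcdf, List.nil_append]
            exact pvCcdfList_mem_key _ _ _ _ hm1k
      rcases hBm with ⟨p, hpB, hp1⟩
      rw [← hEq] at hpB
      exact hAne p hpB hp1
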